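-- pv_equiv track=rewrite | github.com/chrispam123/podcast-reader | generador_pdf.py | _partir_tokens_largos
-- ===== SOURCE A (Python) =====
-- def _partir_tokens_largos(texto: str, max_largo_token: int = 60) -> str:
--     """
--     Inserta espacios en tokens extremadamente largos para evitar errores de salto
--     de línea en FPDF cuando no existe espacio horizontal suficiente.
--     """
--     tokens = texto.split(" ")
--     tokens_ajustados: list[str] = []
--
--     for token in tokens:
--         if len(token) <= max_largo_token:
--             tokens_ajustados.append(token)
--             continue
--
--         partes = [token[i : i + max_largo_token] for i in range(0, len(token), max_largo_token)]
--         tokens_ajustados.append(" ".join(partes))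
--
--     return " ".join(tokens_ajustados)
-- ===== SOURCE B (Python) =====
-- def _partir_tokens_largos(texto: str, max_largo_token: int = 60) -> str:
--     """
--     Inserta espacios en tokens extremadamente largos para evitar errores de salto
--     de línea en FPDF cuando no existe espacio horizontal suficiente.
--     """
--     out = []
--     run = 0  # non-space characters accumulated in the current piece
--     for ch in texto:
--         if ch == " ":
--             out.append(ch)
--             run = 0
--         else:
--             if run == max_largo_token:
--                 out.append(" ")
--                 run = 0
--             out.append(ch)
--             run += 1
--     return "".join(out)
-- ===== Notes on version B (the rewrite author's own statement) =====
-- stated objective: alternative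
-- what changed: Replaces split-into-tokens / chunk-by-slicing / double join with a single left-to-right character scan that keeps a counter of non-space characters and inserts a space whenever the counter reaches max_largo_token; no token or chunk list is ever built.
-- outside the precondition, e.g. on _partir_tokens_largos('ab', -1): A returns '', B returns 'ab'; on _partir_tokens_largos('ab', 0): A raises ValueError, B returns ' ab'
import Mathlib
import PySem

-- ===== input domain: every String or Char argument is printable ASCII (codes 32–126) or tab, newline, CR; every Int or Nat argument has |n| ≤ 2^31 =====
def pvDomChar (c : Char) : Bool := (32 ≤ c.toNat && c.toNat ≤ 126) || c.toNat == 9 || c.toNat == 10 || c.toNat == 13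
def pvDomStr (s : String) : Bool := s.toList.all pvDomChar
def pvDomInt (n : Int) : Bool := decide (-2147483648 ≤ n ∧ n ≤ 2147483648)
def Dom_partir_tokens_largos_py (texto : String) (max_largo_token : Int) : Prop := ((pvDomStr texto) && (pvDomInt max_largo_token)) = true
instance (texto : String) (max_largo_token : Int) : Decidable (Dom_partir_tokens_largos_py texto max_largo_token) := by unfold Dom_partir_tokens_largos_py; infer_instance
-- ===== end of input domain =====

-- B replaces A's split-tokens / chunk-by-slicing / double-join pipeline by a single
-- left-to-right character scan with a non-space counter (alternative decomposition).


-- ===== PORT A =====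
-- partes = [token[i : i + max_largo_token] for i in range(0, len(token), max_largo_token)]; " ".join(partes)
def pvChunkA (token : List Char) (m : Int) : List Char :=
  PySem.Chars.join [' ']
    ((PySem.List.pyRange 0 (token.length : Int) m).map
      (fun i => PySem.List.slice token (some i) (some (i + m))))

def partir_tokens_largos_py (texto : String) (max_largo_token : Int) : String :=
  let tokens := PySem.Chars.splitOn texto.toList [' ']
  let tokens_ajustados := tokens.foldl
    (fun acc token =>
      if (token.length : Int) ≤ max_largo_token then acc ++ [token]
      else acc ++ [pvChunkA token max_largo_token]) []
  String.ofList (PySem.Chars.join [' '] tokens_ajustados)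

-- ===== PORT B =====
-- one scan; state = (output characters so far, count of non-space chars in the current piece)
def pvStepB (m : Int) (s : List Char × Int) (c : Char) : List Char × Int :=
  if c = ' ' then (s.1 ++ [c], 0)
  else if s.2 = m then (s.1 ++ [' ', c], 1)
  else (s.1 ++ [c], s.2 + 1)

def partir_tokens_largos_py_alt (texto : String) (max_largo_token : Int) : String :=
  String.ofList (texto.toList.foldl (pvStepB max_largo_token) ([], 0)).1

-- ===== PRECONDITION & SPEC =====
-- Pre_ admits the natural domain max_largo_token ≥ 1, plus any all-space text (there the
-- parameter is irrelevant and both programs return the text); excluded are exactly the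
-- inputs with max ≤ 0 and a non-space character, where A raises ValueError (max = 0,
-- range() with step 0) or, for a meaningless negative maximum, chunks every token over an
-- empty range and returns only the separating spaces.
def Pre_partir_tokens_largos_py (texto : String) (max_largo_token : Int) : Prop :=
  1 ≤ max_largo_token ∨ ∀ c ∈ texto.toList, c = ' '
instance (texto : String) (max_largo_token : Int) : Decidable (Pre_partir_tokens_largos_py texto max_largo_token) := by unfold Pre_partir_tokens_largos_py; infer_instance
def pvWitness_partir_tokens_largos_py : String × Int := ("hello world absolutely", 3)

def Spec_partir_tokens_largos_py (texto : String) (max_largo_token : Int) (out : String) : Prop := out = partir_tokens_largos_py_alt texto max_largo_token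
instance (texto : String) (max_largo_token : Int) (out : String) : Decidable (Spec_partir_tokens_largos_py texto max_largo_token out) := by unfold Spec_partir_tokens_largos_py; infer_instance

-- ===== CLAIM (what is proved, stated in full; the proofs are below) =====
def Claim_equal_partir_tokens_largos_py : Prop := ∀ (texto : String) (max_largo_token : Int), Dom_partir_tokens_largos_py texto max_largo_token → Pre_partir_tokens_largos_py texto max_largo_token → Spec_partir_tokens_largos_py texto max_largo_token (partir_tokens_largos_py texto max_largo_token)

-- ===== LEMMAS AND PROOFS =====

-- proof-side spec of B's scan over a space-free run, entered with counter r
def pvIns (m : Int) : Int → List Char → List Char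
  | _, [] => []
  | r, c :: cs => if r = m then ' ' :: c :: pvIns m 1 cs else c :: pvIns m (r + 1) cs

def pvRun (m : Int) : Int → List Char → Int
  | r, [] => r
  | r, _ :: cs => if r = m then pvRun m 1 cs else pvRun m (r + 1) cs

-- proof-side spec of split(" ")
def pvSplit : List Char → List (List Char)
  | [] => [[]]
  | c :: cs =>
    if c = ' ' then [] :: pvSplit cs
    else match pvSplit cs with
      | [] => [[c]]
      | t :: ts => (c :: t) :: ts

def pvConsHead (p : List Char) : List (List Char) → List (List Char)
  | [] => [p]
  | t :: ts => (p ++ t) :: ts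

lemma pvSplit_ne_nil (cs : List Char) : pvSplit cs ≠ [] := by
  induction cs with
  | nil => simp [pvSplit]
  | cons c cs ih =>
    simp only [pvSplit]
    split
    · simp
    · cases h : pvSplit cs with
      | nil => simp
      | cons t ts => simp

lemma pvGo_spec (fuel : Nat) : ∀ (l : List Char), l.length < fuel → ∀ cur acc,
    PySem.Chars.splitOn.go [' '] fuel l cur acc
      = acc.reverse ++ pvConsHead cur.reverse (pvSplit l) := by
  induction fuel with
  | zero => intro l h; omega
  | succ f ih =>
    intro l h cur acc
    cases l with
    | nil => simp [PySem.Chars.splitOn.go, pvSplit, pvConsHead]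
    | cons c rest =>
      by_cases hc : c = ' '
      · subst hc
        simp only [PySem.Chars.splitOn.go, List.isPrefixOf]
        rw [if_pos (by simp)]
        simp only [List.length_cons, List.length_nil, List.drop_succ_cons, List.drop_zero]
        rw [ih rest (by simp at h ⊢; omega) [] (cur.reverse :: acc)]
        simp [pvSplit]
        cases hs : pvSplit rest with
        | nil => exact absurd hs (pvSplit_ne_nil rest)
        | cons t ts => simp [pvConsHead]
      · simp only [PySem.Chars.splitOn.go, List.isPrefixOf]
        rw [if_neg (by simp [Ne.symm hc])]
        rw [ih rest (by simp at h ⊢; omega) (c :: cur) acc]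
        simp only [pvSplit, if_neg hc]
        cases hs : pvSplit rest with
        | nil => exact absurd hs (pvSplit_ne_nil rest)
        | cons t ts => simp [pvConsHead]

lemma pvSplitOn_eq (cs : List Char) : PySem.Chars.splitOn cs [' '] = pvSplit cs := by
  unfold PySem.Chars.splitOn
  rw [pvGo_spec (cs.length + 1) cs (by omega) [] []]
  cases hs : pvSplit cs with
  | nil => exact absurd hs (pvSplit_ne_nil cs)
  | cons t ts => simp [pvConsHead]

lemma pvSplit_free (t : List Char) (h : ∀ c ∈ t, c ≠ ' ') : pvSplit t = [t] := by
  induction t with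
  | nil => rfl
  | cons c cs ih =>
    have hc : c ≠ ' ' := h c (by simp)
    simp only [pvSplit, if_neg hc, ih (fun x hx => h x (by simp [hx]))]

lemma pvSplit_sep (t : List Char) (h : ∀ c ∈ t, c ≠ ' ') (cs : List Char) :
    pvSplit (t ++ ' ' :: cs) = t :: pvSplit cs := by
  induction t with
  | nil => simp [pvSplit]
  | cons c t' ih =>
    have hc : c ≠ ' ' := h c (by simp)
    simp only [List.cons_append, pvSplit, if_neg hc, ih (fun x hx => h x (by simp [hx]))]

lemma pvJoin_cons (p : List Char) (ps : List (List Char)) :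
    PySem.Chars.join [' '] (p :: ps)
      = p ++ (if ps = [] then [] else ' ' :: PySem.Chars.join [' '] ps) := by
  cases ps with
  | nil => simp [PySem.Chars.join_singleton]
  | cons q qs => simp [PySem.Chars.join_cons_cons]

-- B's fold over a space-free run
lemma pvFoldB (m : Int) (t : List Char) (h : ∀ c ∈ t, c ≠ ' ') : ∀ acc r,
    t.foldl (pvStepB m) (acc, r) = (acc ++ pvIns m r t, pvRun m r t) := by
  induction t with
  | nil => intro acc r; simp [pvIns, pvRun]
  | cons c cs ih =>
    intro acc r
    have hc : c ≠ ' ' := h c (by simp)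
    have ih' := ih (fun x hx => h x (by simp [hx]))
    by_cases hr : r = m
    · simp [List.foldl_cons, pvStepB, if_neg hc, hr, ih', pvIns, pvRun]
    · simp [List.foldl_cons, pvStepB, if_neg hc, ih', pvIns, pvRun, hr]

-- keep-short / split-off-one-chunk, at counter r with r + d = m
lemma pvIns_split (m : Int) (hm : 1 ≤ m) (d : Nat) : ∀ (t : List Char) (r : Int),
    0 ≤ r → r + (d : Int) = m →
    pvIns m r t = if t.length ≤ d then t
      else t.take d ++ ' ' :: pvIns m 0 (t.drop d) := by
  induction d with
  | zero =>
    intro t r h0 hd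
    cases t with
    | nil => simp [pvIns]
    | cons c cs =>
      have hr : r = m := by omega
      simp only [pvIns, if_pos hr, List.length_cons, Nat.le_zero,
        List.take_zero, List.drop_zero, List.nil_append]
      rw [if_neg (by omega)]
      rw [if_neg (show (0:Int) ≠ m by omega)]
      norm_num
  | succ d ihd =>
    intro t r h0 hd
    cases t with
    | nil => simp [pvIns]
    | cons c cs =>
      have hr : r ≠ m := by push_cast at hd; omega
      simp only [pvIns, if_neg hr]
      rw [ihd cs (r+1) (by omega) (by push_cast at hd ⊢; omega)]
      by_cases hl : cs.length ≤ d
      · rw [if_pos hl, if_pos (by simp; omega)]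
      · rw [if_neg hl, if_neg (by simp; omega)]
        simp [List.take_succ_cons, List.drop_succ_cons]

-- number of chunks range(0, L, m) produces, and its recurrences
def pvNFor (m : Int) (L : Nat) : Nat :=
  if 0 < (L : Int) then (((L : Int) - 0 + m - 1) / m).toNat else 0

lemma pvNFor_zero (m : Int) : pvNFor m 0 = 0 := by simp [pvNFor]

lemma pvNFor_one (m : Int) (hm : 1 ≤ m) (L : Nat) (h0 : 0 < L) (h1 : (L : Int) ≤ m) :
    pvNFor m L = 1 := by
  unfold pvNFor
  rw [if_pos (by exact_mod_cast h0)]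
  have e : (L : Int) - 0 + m - 1 = ((L : Int) - 1) + m * 1 := by ring
  rw [e, Int.add_mul_ediv_left _ _ (by omega)]
  rw [Int.ediv_eq_zero_of_lt (by omega) (by omega)]
  rfl

lemma pvNFor_succ (m : Int) (hm : 1 ≤ m) (L : Nat) (h : m < (L : Int)) :
    pvNFor m L = pvNFor m (L - m.toNat) + 1 := by
  have hmN : ((m.toNat : Int)) = m := Int.toNat_of_nonneg (by omega)
  have hL' : ((L - m.toNat : Nat) : Int) = (L : Int) - m := by
    have : m.toNat ≤ L := by omega
    push_cast [this]; omega
  unfold pvNFor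
  rw [if_pos (by omega), if_pos (by omega)]
  have e : (L : Int) - 0 + m - 1 = (((L - m.toNat : Nat) : Int) - 0 + m - 1) + m * 1 := by
    rw [hL']; ring
  rw [e, Int.add_mul_ediv_left _ _ (by omega)]
  have hq : 0 ≤ (((L - m.toNat : Nat) : Int) - 0 + m - 1) / m :=
    Int.ediv_nonneg (by omega) (by omega)
  omega

-- A's list of slices, in drop/take form
lemma pvChunkA_norm (m : Int) (hm : 1 ≤ m) (t : List Char) :
    pvChunkA t m = PySem.Chars.join [' ']
      ((List.range (pvNFor m t.length)).map
        (fun k => (t.drop (m.toNat * k)).take m.toNat)) := by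
  unfold pvChunkA
  rw [PySem.List.pyRange_of_pos 0 (t.length : Int) (by omega)]
  rw [List.map_map]
  congr 1
  apply List.map_congr_left
  intro k _
  simp only [Function.comp]
  rw [PySem.List.slice_toNat t (by positivity) (by positivity)]
  have h1 : ((0 : Int) + m * (k : Int)).toNat = m.toNat * k := by
    rw [zero_add, Int.toNat_mul (by omega) (by omega)]; simp
  have h2 : ((0 : Int) + m * (k : Int) + m).toNat = m.toNat * k + m.toNat := by
    rw [zero_add, Int.toNat_add (by positivity) (by omega), Int.toNat_mul (by omega) (by omega)]
    simp
  rw [h1, h2]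
  simp

-- chunk-and-join of one token = B's insertion scan from counter 0
lemma pvAdj (m : Int) (hm : 1 ≤ m) : ∀ (L : Nat) (t : List Char), t.length = L →
    PySem.Chars.join [' ']
      ((List.range (pvNFor m L)).map
        (fun k => (t.drop (m.toNat * k)).take m.toNat)) = pvIns m 0 t := by
  intro L
  induction L using Nat.strong_induction_on with
  | _ L ih =>
    intro t ht
    rcases Nat.eq_zero_or_pos L with h0 | h0
    · subst h0
      have : t = [] := List.length_eq_zero_iff.mp ht
      subst this
      simp [pvNFor_zero, PySem.Chars.join_nil, pvIns]
    · by_cases hle : (L : Int) ≤ m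
      · rw [pvNFor_one m hm L h0 hle]
        simp only [List.range_one, List.map_cons, List.map_nil, Nat.mul_zero, List.drop_zero]
        rw [PySem.Chars.join_singleton]
        rw [List.take_of_length_le (by omega)]
        rw [pvIns_split m hm m.toNat t 0 (by omega) (by omega)]
        rw [if_pos (by omega)]
      · have hlt : m < (L : Int) := by omega
        rw [pvNFor_succ m hm L hlt]
        rw [List.range_succ_eq_map, List.map_cons, List.map_map]
        have hhead : (t.drop (m.toNat * 0)).take m.toNat = t.take m.toNat := by simp
        have htail : (List.range (pvNFor m (L - m.toNat))).map
              ((fun k => (t.drop (m.toNat * k)).take m.toNat) ∘ Nat.succ)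
            = (List.range (pvNFor m (L - m.toNat))).map
              (fun k => ((t.drop m.toNat).drop (m.toNat * k)).take m.toNat) := by
          apply List.map_congr_left
          intro k _
          simp only [Function.comp, List.drop_drop]
          congr 2
          simp [Nat.succ_eq_add_one]
          ring
        rw [hhead, htail]
        have hnz : pvNFor m (L - m.toNat) ≠ 0 := by
          have h1 : (1:Int) ≤ (((L - m.toNat : Nat) : Int) - 0 + m - 1) / m := by
            rw [Int.le_ediv_iff_mul_le (by omega)]
            have hmL : m.toNat ≤ L := by omega
            have := Int.toNat_of_nonneg (show (0:Int) ≤ m by omega)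
            push_cast [hmL]
            omega
          unfold pvNFor
          rw [if_pos (by omega)]
          omega
        rw [pvJoin_cons]
        rw [if_neg (by simp [hnz])]
        rw [ih (L - m.toNat) (by omega) (t.drop m.toNat) (by simp [ht])]
        rw [pvIns_split m hm m.toNat t 0 (by omega) (by omega)]
        rw [if_neg (by omega)]

-- A's per-token adjustment = B's insertion scan from counter 0
lemma pvG (m : Int) (hm : 1 ≤ m) (t : List Char) :
    (if (t.length : Int) ≤ m then t else pvChunkA t m) = pvIns m 0 t := by
  by_cases h : (t.length : Int) ≤ m
  · rw [if_pos h]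
    rw [pvIns_split m hm m.toNat t 0 (by omega) (by omega)]
    rw [if_pos (by omega)]
  · rw [if_neg h, pvChunkA_norm m hm t, pvAdj m hm t.length t rfl]

-- main loop invariant: B's whole scan = join of A's adjusted split
lemma pvMain (m : Int) (hm : 1 ≤ m) : ∀ (L : Nat) (cs : List Char), cs.length = L →
    ∀ acc : List Char,
    (cs.foldl (pvStepB m) (acc, 0)).1
      = acc ++ PySem.Chars.join [' ']
          ((pvSplit cs).map (fun t =>
            if (t.length : Int) ≤ m then t else pvChunkA t m)) := by
  intro L
  induction L using Nat.strong_induction_on with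
  | _ L ih =>
    intro cs hlen acc
    have hsp : cs.takeWhile (fun c => !(c == ' ')) ++ cs.dropWhile (fun c => !(c == ' ')) = cs :=
      List.takeWhile_append_dropWhile
    have ht : ∀ c ∈ cs.takeWhile (fun c => !(c == ' ')), c ≠ ' ' := by
      intro c hc
      have := List.mem_takeWhile_imp hc
      simpa using this
    cases hrest : cs.dropWhile (fun c => !(c == ' ')) with
    | nil =>
      have hcs : cs = cs.takeWhile (fun c => !(c == ' ')) := by
        conv_lhs => rw [← hsp]
        rw [hrest, List.append_nil]
      rw [hcs, (pvFoldB m _ ht) acc 0, pvSplit_free _ ht]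
      simp only [List.map_cons, List.map_nil]
      rw [PySem.Chars.join_singleton, pvG m hm]
    | cons c cs2 =>
      have hc : c = ' ' := by
        have := List.head?_dropWhile_not (fun c => !(c == ' ')) cs
        rw [hrest] at this
        simpa using this
      subst hc
      have hcs : cs = cs.takeWhile (fun c => !(c == ' ')) ++ ' ' :: cs2 := by
        conv_lhs => rw [← hsp]
        rw [hrest]
      have hlen2 : cs2.length < L := by
        have := congrArg List.length hcs
        simp at this
        omega
      conv_lhs => rw [hcs]
      rw [List.foldl_append, (pvFoldB m _ ht) acc 0]
      rw [List.foldl_cons]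
      have hstep : pvStepB m (acc ++ pvIns m 0 (cs.takeWhile (fun c => !(c == ' '))),
          pvRun m 0 (cs.takeWhile (fun c => !(c == ' ')))) ' '
          = (acc ++ pvIns m 0 (cs.takeWhile (fun c => !(c == ' '))) ++ [' '], 0) := by
        simp [pvStepB]
      rw [hstep]
      rw [ih cs2.length hlen2 cs2 rfl]
      conv_rhs => rw [hcs]
      rw [pvSplit_sep _ ht cs2]
      simp only [List.map_cons]
      rw [pvG m hm]
      rw [pvJoin_cons]
      have hne : ¬ ((pvSplit cs2).map (fun t =>
          if (t.length : Int) ≤ m then t else pvChunkA t m) = []) := by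
        simp [pvSplit_ne_nil cs2]
      rw [if_neg hne]
      simp

-- an all-space text is returned unchanged by A's pipeline, for every m
lemma pvG_nil (m : Int) :
    (if ((List.length ([] : List Char)) : Int) ≤ m then ([] : List Char) else pvChunkA [] m)
      = [] := by
  split
  · rfl
  · unfold pvChunkA
    simp [PySem.List.pyRange, PySem.Chars.join_nil]

lemma pvSpacesA (m : Int) : ∀ cs : List Char, (∀ c ∈ cs, c = ' ') →
    PySem.Chars.join [' ']
      ((pvSplit cs).map (fun t =>
        if (t.length : Int) ≤ m then t else pvChunkA t m)) = cs := by
  intro cs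
  induction cs with
  | nil =>
    intro _
    simp only [pvSplit, List.map_cons, List.map_nil, pvG_nil]
    rw [PySem.Chars.join_singleton]
  | cons c cs ih =>
    intro h
    have hc : c = ' ' := h c (by simp)
    subst hc
    simp only [pvSplit, reduceIte, List.map_cons, pvG_nil]
    rw [pvJoin_cons]
    rw [if_neg (by simp [pvSplit_ne_nil cs])]
    rw [ih (fun x hx => h x (by simp [hx]))]
    simp

-- an all-space text is returned unchanged by B's scan
lemma pvSpacesB (m : Int) : ∀ cs : List Char, (∀ c ∈ cs, c = ' ') → ∀ acc r,
    (cs.foldl (pvStepB m) (acc, r)).1 = acc ++ cs := by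
  intro cs
  induction cs with
  | nil => intro _ acc r; simp
  | cons c cs ih =>
    intro h acc r
    have hc : c = ' ' := h c (by simp)
    subst hc
    simp only [List.foldl_cons, pvStepB, reduceIte]
    rw [ih (fun x hx => h x (by simp [hx]))]
    simp

-- ===== VERDICT (by name: the statement is the Claim_ definition above) =====
theorem partir_tokens_largos_py_spec : Claim_equal_partir_tokens_largos_py := by
  unfold Claim_equal_partir_tokens_largos_py
  intro texto m _ hpre
  unfold Spec_partir_tokens_largos_py
  unfold partir_tokens_largos_py partir_tokens_largos_py_alt
  have hstep : (fun (acc : List (List Char)) token =>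
      if (token.length : Int) ≤ m then acc ++ [token]
      else acc ++ [pvChunkA token m])
      = fun acc token => acc ++ [if (token.length : Int) ≤ m then token else pvChunkA token m] := by
    funext acc token
    split <;> simp_all
  simp only [hstep]
  rw [PySem.List.foldl_append_singleton_eq_map, pvSplitOn_eq]
  by_cases hm : 1 ≤ m
  · rw [pvMain m hm texto.toList.length texto.toList rfl []]
    simp
  · have hsp : ∀ c ∈ texto.toList, c = ' ' := hpre.resolve_left hm
    simp [pvSpacesA m texto.toList hsp, pvSpacesB m texto.toList hsp [] 0]
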